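-- pv_equiv track=rewrite | github.com/mkierc/advent-of-code | 2017/src/day_21/part_1_part_2.py | enhance_2
-- ===== SOURCE A (Python) =====
-- def enhance_2(grid, rules):
--     enhanced = []
--     size = len(grid) // 2
--
--     for i in range(size):
--         line1 = ''
--         line2 = ''
--         line3 = ''
--         for j in range(size):
--             before = grid[i * 2][j * 2:(j + 1) * 2] + '/' + \
--                      grid[i * 2 + 1][j * 2:(j + 1) * 2]
--             after = rules[before].split('/')
--             line1 += after[0]
--             line2 += after[1]
--             line3 += after[2]
--         enhanced.append(line1)
--         enhanced.append(line2)
--         enhanced.append(line3)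
--     return enhanced
-- ===== SOURCE B (Python) =====
-- def enhance_2(grid, rules):
--     size = len(grid) // 2
--     return [
--         ''.join(rules[grid[2 * i][2 * j:2 * j + 2] + '/' +
--                       grid[2 * i + 1][2 * j:2 * j + 2]].split('/')[k]
--                 for j in range(size))
--         for i in range(size) for k in range(3)
--     ]
-- ===== Notes on version B (the rewrite author's own statement) =====
-- stated objective: alternative
-- what changed: B replaces A's per-block-row triple of parallel accumulator strings (line1/line2/line3 built in an inner loop, then appended) with a flat row-by-row comprehension: for each (i, k) output row it joins the k-th line of every enhanced block directly.
import Mathlib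
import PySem

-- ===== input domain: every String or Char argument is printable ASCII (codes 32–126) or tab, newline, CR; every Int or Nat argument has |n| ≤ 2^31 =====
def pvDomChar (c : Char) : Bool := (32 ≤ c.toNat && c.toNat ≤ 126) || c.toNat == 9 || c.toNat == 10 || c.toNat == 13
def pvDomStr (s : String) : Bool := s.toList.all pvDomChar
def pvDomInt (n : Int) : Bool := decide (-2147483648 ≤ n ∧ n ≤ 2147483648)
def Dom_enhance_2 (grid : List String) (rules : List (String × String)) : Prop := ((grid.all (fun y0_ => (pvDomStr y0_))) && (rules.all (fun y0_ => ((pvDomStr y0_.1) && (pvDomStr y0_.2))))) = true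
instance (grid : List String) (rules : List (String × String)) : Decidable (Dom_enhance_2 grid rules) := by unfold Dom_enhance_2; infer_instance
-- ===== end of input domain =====

-- B builds each output row directly (flat row-by-row comprehension with a join per row)
-- instead of A's three parallel accumulator strings per block row: objective 'alternative'.

-- ===== PORT A =====
-- literal port of A: outer loop over row-blocks i, inner loop accumulating
-- three parallel lines (line1, line2, line3), then appending all three.
-- dict lookup / after[k] use defaults ""/[]: inside Pre_ the key is present and
-- the split has ≥ 3 parts, so the defaults are never taken (Python raises outside Pre_).
def enhance_2 (grid : List String) (rules : List (String × String)) : List String :=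
  let size : Int := PySem.Int.floordiv (PySem.List.len grid) 2
  (PySem.List.pyRange 0 size 1).foldl (fun enhanced i =>
    let st := (PySem.List.pyRange 0 size 1).foldl (fun (st : String × String × String) j =>
      let before : String :=
        PySem.Str.slice (PySem.List.pyGetD grid (i * 2) "") (some (j * 2)) (some ((j + 1) * 2)) ++ "/" ++
        PySem.Str.slice (PySem.List.pyGetD grid (i * 2 + 1) "") (some (j * 2)) (some ((j + 1) * 2))
      let after : List String := (PySem.Str.split? ((PySem.Dict.mk rules).getD before "") "/").getD []
      (st.1 ++ PySem.List.pyGetD after 0 "",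
       st.2.1 ++ PySem.List.pyGetD after 1 "",
       st.2.2 ++ PySem.List.pyGetD after 2 "")) ("", "", "")
    enhanced ++ [st.1, st.2.1, st.2.2]) []

-- ===== PORT B =====
-- literal port of Source B: one flat comprehension over (i, k), each output row a join over j.
def enhance_2_alt (grid : List String) (rules : List (String × String)) : List String :=
  let size : Int := PySem.Int.floordiv (PySem.List.len grid) 2
  (PySem.List.pyRange 0 size 1).flatMap (fun i =>
    (PySem.List.pyRange 0 3 1).map (fun k =>
      PySem.Str.join "" ((PySem.List.pyRange 0 size 1).map (fun j =>
        PySem.List.pyGetD ((PySem.Str.split? ((PySem.Dict.mk rules).getD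
          (PySem.Str.slice (PySem.List.pyGetD grid (2 * i) "") (some (2 * j)) (some (2 * j + 2)) ++ "/" ++
           PySem.Str.slice (PySem.List.pyGetD grid (2 * i + 1) "") (some (2 * j)) (some (2 * j + 2))) "") "/").getD []) k ""))))

-- ===== PRECONDITION & SPEC =====
-- the 2x2/2x2 key of block (i, j), as Python A computes it (used only by Pre_)
def pvKey_enhance_2 (grid : List String) (i j : Int) : String :=
  PySem.Str.slice (PySem.List.pyGetD grid (i * 2) "") (some (j * 2)) (some ((j + 1) * 2)) ++ "/" ++
  PySem.Str.slice (PySem.List.pyGetD grid (i * 2 + 1) "") (some (j * 2)) (some ((j + 1) * 2))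

-- Pre_: every block's key is present in rules and its value splits into ≥ 3 parts;
-- outside this, Python A raises (KeyError / IndexError) — no returning input is excluded.
def Pre_enhance_2 (grid : List String) (rules : List (String × String)) : Prop :=
  ∀ i ∈ PySem.List.pyRange 0 (PySem.Int.floordiv (PySem.List.len grid) 2) 1,
    ∀ j ∈ PySem.List.pyRange 0 (PySem.Int.floordiv (PySem.List.len grid) 2) 1,
      (PySem.Dict.mk rules).contains (pvKey_enhance_2 grid i j) = true ∧
      3 ≤ ((PySem.Str.split? ((PySem.Dict.mk rules).getD (pvKey_enhance_2 grid i j) "") "/").getD []).length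

instance (grid : List String) (rules : List (String × String)) : Decidable (Pre_enhance_2 grid rules) := by
  unfold Pre_enhance_2; infer_instance

def pvWitness_enhance_2 : List String × (List (String × String)) :=
  (["#.", ".."], [("#./..", "##./#../...")])

def Spec_enhance_2 (grid : List String) (rules : List (String × String)) (out : List String) : Prop := out = enhance_2_alt grid rules
instance (grid : List String) (rules : List (String × String)) (out : List String) : Decidable (Spec_enhance_2 grid rules out) := by unfold Spec_enhance_2; infer_instance

-- ===== CLAIM (what is proved, stated in full; the proofs are below) =====
def Claim_equal_enhance_2 : Prop := ∀ (grid : List String) (rules : List (String × String)), Dom_enhance_2 grid rules → Pre_enhance_2 grid rules → Spec_enhance_2 grid rules (enhance_2 grid rules)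

-- ===== LEMMAS AND PROOFS =====
theorem pv_join_nil : PySem.Str.join "" [] = "" := by
  simp [PySem.Str.join, PySem.Chars.join, List.intercalate]

theorem pv_join_cons (a : String) (l : List String) :
    PySem.Str.join "" (a :: l) = a ++ PySem.Str.join "" l := by
  cases l <;> simp [PySem.Str.join, PySem.Chars.join, List.intercalate, String.ofList_append]

-- A's inner loop: the triple of accumulators is the triple of joins
theorem pv_foldl3 (c1 c2 c3 : Int → String) (L : List Int) (a b c : String) :
    L.foldl (fun st j => (st.1 ++ c1 j, st.2.1 ++ c2 j, st.2.2 ++ c3 j)) (a, b, c)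
      = (a ++ PySem.Str.join "" (L.map c1),
         b ++ PySem.Str.join "" (L.map c2),
         c ++ PySem.Str.join "" (L.map c3)) := by
  induction L generalizing a b c with
  | nil => simp [pv_join_nil]
  | cons x t ih => simp [List.foldl_cons, ih, pv_join_cons, String.append_assoc]

-- A's outer loop: appending three rows per i is a flatMap
theorem pv_foldl_app (g : Int → List String) (L : List Int) (acc : List String) :
    L.foldl (fun acc i => acc ++ g i) acc = acc ++ L.flatMap g := by
  induction L generalizing acc with
  | nil => simp
  | cons x t ih => simp [List.foldl_cons, ih]

-- the decoded block of (i, j) is the same whether its indices are spelled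
-- i*2 / (j+1)*2 (A) or 2*i / 2*j+2 (B)
theorem pv_arg (grid : List String) (rules : List (String × String)) (i j : Int) :
    ((PySem.Str.split? ((PySem.Dict.mk rules).getD
        (PySem.Str.slice (PySem.List.pyGetD grid (i * 2) "") (some (j * 2)) (some ((j + 1) * 2)) ++ "/" ++
         PySem.Str.slice (PySem.List.pyGetD grid (i * 2 + 1) "") (some (j * 2)) (some ((j + 1) * 2))) "") "/").getD [])
    = ((PySem.Str.split? ((PySem.Dict.mk rules).getD
        (PySem.Str.slice (PySem.List.pyGetD grid (2 * i) "") (some (2 * j)) (some (2 * j + 2)) ++ "/" ++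
         PySem.Str.slice (PySem.List.pyGetD grid (2 * i + 1) "") (some (2 * j)) (some (2 * j + 2))) "") "/").getD []) := by
  ring_nf

-- ===== VERDICT (by name: the statement is the Claim_ definition above) =====
set_option maxHeartbeats 1000000 in
theorem enhance_2_spec : Claim_equal_enhance_2 := by
  intro grid rules _ _
  unfold Spec_enhance_2 enhance_2 enhance_2_alt
  simp only []
  rw [pv_foldl_app]
  simp only [pv_foldl3, pv_arg, List.nil_append]
  congr 1
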